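-- pv_equiv track=rewrite | github.com/zdragonite21/Advent-of-Code | 2018/2/2.py | returnChar
-- ===== SOURCE A (Python) =====
-- def returnChar(a, b):
--     count = 0
--     remove = 0
--     for i in range(len(a)):
--         if a[i] == b[i]:
--             count += 1
--         else:
--             remove = i
--     return (len(a) - count, remove)
-- ===== SOURCE B (Python) =====
-- def returnChar(a, b):
--     mismatches = sum(1 for i in range(len(a)) if a[i] != b[i])
--     remove = 0
--     for i in reversed(range(len(a))):
--         if a[i] != b[i]:
--             remove = i
--             break
--     return (mismatches, remove)
-- ===== Notes on version B (the rewrite author's own statement) =====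
-- stated objective: alternative
-- what changed: Replaces the single forward loop tracking (count of matches, last-set remove) with a one-pass mismatch sum plus a separate early-terminating reverse scan that breaks at the first (i.e. last) differing index.
import Mathlib
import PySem

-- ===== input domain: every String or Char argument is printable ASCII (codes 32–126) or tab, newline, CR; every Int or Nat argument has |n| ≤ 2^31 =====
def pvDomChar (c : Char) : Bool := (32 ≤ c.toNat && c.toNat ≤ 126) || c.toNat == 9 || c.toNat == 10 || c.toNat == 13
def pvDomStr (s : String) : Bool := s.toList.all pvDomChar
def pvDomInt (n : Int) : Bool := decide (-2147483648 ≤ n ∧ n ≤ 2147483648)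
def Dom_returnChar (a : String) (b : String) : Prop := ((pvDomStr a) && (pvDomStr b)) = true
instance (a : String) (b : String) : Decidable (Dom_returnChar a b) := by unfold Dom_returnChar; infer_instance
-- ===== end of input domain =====

-- B replaces A's single tracking loop with a mismatch-count pass plus a reverse scan that
-- breaks at the first (= last) differing index (objective: alternative decomposition, same cost).
-- ===== PORT A =====
def returnChar (a : String) (b : String) : Int × Int :=
  let la := a.toList
  let lb := b.toList
  let st := (List.range la.length).foldl
    (fun (s : Int × Int) (i : Nat) => if la[i]? = lb[i]? then (s.1 + 1, s.2) else (s.1, (i : Int)))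
    (0, 0)
  ((la.length : Int) - st.1, st.2)

-- ===== PORT B =====
def returnChar_alt (a : String) (b : String) : Int × Int :=
  let la := a.toList
  let lb := b.toList
  let mismatches := (List.range la.length).foldl
    (fun (m : Int) (i : Nat) => if la[i]? ≠ lb[i]? then m + 1 else m) 0
  let remove : Int :=
    match (List.range la.length).reverse.find? (fun (i : Nat) => decide (la[i]? ≠ lb[i]?)) with
    | some i => (i : Int)
    | none => 0
  (mismatches, remove)

-- ===== PRECONDITION & SPEC =====
-- Pre_ excludes exactly the inputs where Python raises IndexError: b shorter than a.
def Pre_returnChar (a : String) (b : String) : Prop := a.toList.length ≤ b.toList.length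
instance (a : String) (b : String) : Decidable (Pre_returnChar a b) := by unfold Pre_returnChar; infer_instance
def pvWitness_returnChar : String × String := ("abcd", "abed")
def Spec_returnChar (a : String) (b : String) (out : Int × Int) : Prop := out = returnChar_alt a b
instance (a : String) (b : String) (out : Int × Int) : Decidable (Spec_returnChar a b out) := by unfold Spec_returnChar; infer_instance

-- ===== CLAIM (what is proved, stated in full; the proofs are below) =====
def Claim_equal_returnChar : Prop := ∀ (a : String) (b : String), Dom_returnChar a b → Pre_returnChar a b → Spec_returnChar a b (returnChar a b)

-- ===== LEMMAS AND PROOFS =====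

-- A's running match-count plus B's running mismatch-count advances by exactly one per index.
theorem pv_count_lemma (la lb : List Char) :
    ∀ (l : List Nat) (c m : Int) (r : Int),
      (l.foldl (fun (s : Int × Int) (i : Nat) => if la[i]? = lb[i]? then (s.1 + 1, s.2) else (s.1, (i : Int))) (c, r)).1
        + l.foldl (fun (m : Int) (i : Nat) => if la[i]? ≠ lb[i]? then m + 1 else m) m
      = c + m + l.length := by
  intro l
  induction l with
  | nil => intro c m r; simp
  | cons x t ih =>
      intro c m r
      simp only [List.foldl_cons, List.length_cons]
      by_cases h : la[x]? = lb[x]?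
      · simp only [if_pos h, if_neg (not_not_intro h)]
        have := ih (c + 1) m r
        omega
      · simp only [if_neg h, if_pos h]
        have := ih c (m + 1) (x : Int)
        omega

-- A's 'remove' after folding a list of indices is the first mismatch of the reversed list.
theorem pv_remove_lemma (la lb : List Char) :
    ∀ (l : List Nat) (c r : Int),
      (l.foldl (fun (s : Int × Int) (i : Nat) => if la[i]? = lb[i]? then (s.1 + 1, s.2) else (s.1, (i : Int))) (c, r)).2
      = (match l.reverse.find? (fun (i : Nat) => decide (la[i]? ≠ lb[i]?)) with
         | some i => (i : Int)
         | none => r) := by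
  intro l
  induction l with
  | nil => intro c r; simp
  | cons x t ih =>
      intro c r
      simp only [List.foldl_cons, List.reverse_cons, List.find?_append]
      by_cases h : la[x]? = lb[x]?
      · rw [if_pos h]
        rw [ih (c + 1) r]
        cases hf : t.reverse.find? (fun (i : Nat) => decide (la[i]? ≠ lb[i]?)) with
        | some i => simp
        | none => simp [List.find?, h]
      · rw [if_neg h]
        rw [ih c (x : Int)]
        cases hf : t.reverse.find? (fun (i : Nat) => decide (la[i]? ≠ lb[i]?)) with
        | some i => simp
        | none => simp [List.find?, h]

-- ===== VERDICT (by name: the statement is the Claim_ definition above) =====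
theorem returnChar_spec : Claim_equal_returnChar := by
  intro a b _ _
  unfold Spec_returnChar returnChar returnChar_alt
  simp only []
  refine Prod.ext ?_ ?_
  · have := pv_count_lemma a.toList b.toList (List.range a.toList.length) 0 0 0
    simp only [List.length_range] at this
    simp only []
    omega
  · have := pv_remove_lemma a.toList b.toList (List.range a.toList.length) 0 0
    simpa using this
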